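-- pv_equiv track=rewrite | github.com/ibiaalice/ATAL | ataux-3/questao1.py | filtra_array
-- ===== SOURCE A (Python) =====
-- def filtra_array(n, array):
--
--     div4 = 0
--     div8 = 0
--     div15 = 0
--     div16 = 0
--     div23 = 0
--     div42 = 0
--
--     for i in range(n):
--         if(array[i] == 4):
--             div4 += 1
--
--         elif(array[i] == 8):
--             if div4 >0:
--                 div4 -= 1
--                 div8 += 1
--
--         elif(array[i] == 15):
--             if div8 > 0:
--                 div8 -= 1
--                 div15 += 1
--
--         elif(array[i] == 16):
--             if div15 > 0:
--                 div15 -= 1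
--                 div16 += 1
--
--         elif(array[i] == 23):
--             if div16 > 0:
--                 div16 -= 1
--                 div23 += 1
--
--         elif(array[i] == 42):
--             if div23 > 0:
--                 div23 -= 1
--                 div42 += 1
--
--     return (n-div42 * 6)
-- ===== SOURCE B (Python) =====
-- def filtra_array(n, array):
--     # Staged matching: one full pass per chain stage, producing a 0/1 match-flag
--     # list per stage; a stage-k token at position i is matched with an unmatched
--     # stage-(k-1) flag at some position <= i. After the 42-pass, sum(flags) is
--     # the number of completed 4-8-15-16-23-42 chains.
--     values = [array[i] for i in range(n)]
--     flags = [1 if x == 4 else 0 for x in values]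
--     for target in (8, 15, 16, 23, 42):
--         supply = 0
--         new_flags = []
--         for x, f in zip(values, flags):
--             supply += f
--             if x == target and supply > 0:
--                 supply -= 1
--                 new_flags.append(1)
--             else:
--                 new_flags.append(0)
--         flags = new_flags
--     return n - 6 * sum(flags)
-- ===== Notes on version B (the rewrite author's own statement) =====
-- stated objective: alternative
-- what changed: Replaces A's single pass with six simultaneous scalar counters by a staged six-pass algorithm: one full pass per chain stage, each pass producing a 0/1 match-flag list that feeds the next stage's supply, with the answer n - 6*sum of the final flag list.
import Mathlib
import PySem

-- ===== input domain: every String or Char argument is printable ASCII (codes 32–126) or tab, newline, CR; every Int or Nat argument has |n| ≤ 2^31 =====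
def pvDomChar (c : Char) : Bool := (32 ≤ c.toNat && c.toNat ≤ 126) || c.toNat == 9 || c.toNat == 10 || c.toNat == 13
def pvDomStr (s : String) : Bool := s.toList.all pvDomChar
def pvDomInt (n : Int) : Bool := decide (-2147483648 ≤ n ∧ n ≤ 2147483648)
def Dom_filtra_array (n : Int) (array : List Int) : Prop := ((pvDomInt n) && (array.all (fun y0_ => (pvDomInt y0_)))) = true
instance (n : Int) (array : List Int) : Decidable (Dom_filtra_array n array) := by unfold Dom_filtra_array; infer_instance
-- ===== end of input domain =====

-- B replaces A's single pass with six simultaneous counters by a staged six-pass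
-- algorithm (one pass per chain stage, each producing a 0/1 match-flag list that
-- feeds the next stage); objective: alternative, same asymptotic cost.

-- ===== PORT A =====
-- one loop iteration of A over the six named counters (div4,…,div42)
def pvStepA (st : Int × Int × Int × Int × Int × Int) (x : Int) :
    Int × Int × Int × Int × Int × Int :=
  let (d4, d8, d15, d16, d23, d42) := st
  if x = 4 then (d4 + 1, d8, d15, d16, d23, d42)
  else if x = 8 then
    (if d4 > 0 then (d4 - 1, d8 + 1, d15, d16, d23, d42) else st)
  else if x = 15 then
    (if d8 > 0 then (d4, d8 - 1, d15 + 1, d16, d23, d42) else st)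
  else if x = 16 then
    (if d15 > 0 then (d4, d8, d15 - 1, d16 + 1, d23, d42) else st)
  else if x = 23 then
    (if d16 > 0 then (d4, d8, d15, d16 - 1, d23 + 1, d42) else st)
  else if x = 42 then
    (if d23 > 0 then (d4, d8, d15, d16, d23 - 1, d42 + 1) else st)
  else st

def filtra_array (n : Int) (array : List Int) : Int :=
  -- array[i] is in range under Pre_; pyGetD's default is never used there
  let s := (PySem.List.pyRange 0 n 1).foldl
    (fun st i => pvStepA st (PySem.List.pyGetD array i 0)) (0, 0, 0, 0, 0, 0)
  n - s.2.2.2.2.2 * 6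

-- ===== PORT B =====
-- one stage pass of B: walk the (value, previous-stage flag) pairs with a supply
-- counter, emitting 1 exactly where a `t` is matched against available supply
def pvPass (t : Int) : List (Int × Int) → Int → List Int
  | [], _ => []
  | (x, f) :: rest, supply =>
    if x = t ∧ supply + f > 0 then 1 :: pvPass t rest (supply + f - 1)
    else 0 :: pvPass t rest (supply + f)

def filtra_array_alt (n : Int) (array : List Int) : Int :=
  let values := (PySem.List.pyRange 0 n 1).map (fun i => PySem.List.pyGetD array i 0)
  let flags0 := values.map (fun x => if x = 4 then (1 : Int) else 0)
  let flags := [(8 : Int), 15, 16, 23, 42].foldl (fun f t => pvPass t (values.zip f) 0) flags0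
  n - 6 * flags.sum

-- ===== PRECONDITION & SPEC =====
-- A raises IndexError iff some i < n is out of range of array, i.e. iff n > len(array)
def Pre_filtra_array (n : Int) (array : List Int) : Prop := n ≤ (array.length : Int)
instance (n : Int) (array : List Int) : Decidable (Pre_filtra_array n array) := by
  unfold Pre_filtra_array; infer_instance
def pvWitness_filtra_array : Int × List Int := (6, [4, 8, 15, 16, 23, 42])

def Spec_filtra_array (n : Int) (array : List Int) (out : Int) : Prop := out = filtra_array_alt n array
instance (n : Int) (array : List Int) (out : Int) : Decidable (Spec_filtra_array n array out) := by unfold Spec_filtra_array; infer_instance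

-- ===== CLAIM (what is proved, stated in full; the proofs are below) =====
def Claim_equal_filtra_array : Prop := ∀ (n : Int) (array : List Int), Dom_filtra_array n array → Pre_filtra_array n array → Spec_filtra_array n array (filtra_array n array)

-- ===== LEMMAS AND PROOFS =====

-- unfolding equation of one pvPass step
theorem pvPass_cons (t x f supply : Int) (rest : List (Int × Int)) :
    pvPass t ((x, f) :: rest) supply
      = if x = t ∧ supply + f > 0 then 1 :: pvPass t rest (supply + f - 1)
        else 0 :: pvPass t rest (supply + f) := rfl

-- Invariant tying A's six running counters to B's five staged passes: starting A
-- from counters (s2,s3,s4,s5,s6,a), A's final d42 is a plus the number of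
-- matches made by the 42-pass when each pass k is started with supply = A's
-- initial counter for stage k-1.
theorem pvPass_inv (ds : List Int) (s2 s3 s4 s5 s6 a : Int) :
    (ds.foldl pvStepA (s2, s3, s4, s5, s6, a)).2.2.2.2.2
      = a + (pvPass 42 (ds.zip (pvPass 23 (ds.zip (pvPass 16 (ds.zip
          (pvPass 15 (ds.zip (pvPass 8 (ds.zip
            (ds.map (fun x => if x = 4 then (1 : Int) else 0))) s2)) s3)) s4)) s5)) s6).sum := by
  induction ds generalizing s2 s3 s4 s5 s6 a with
  | nil => simp [pvPass]
  | cons x ds ih =>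
    by_cases h4 : x = 4
    · subst h4; simp [pvPass_cons, pvStepA, ih]
    by_cases h8 : x = 8
    · subst h8
      simp [pvPass_cons, pvStepA]
      split_ifs with h <;> simp [pvPass_cons, ih]
    by_cases h15 : x = 15
    · subst h15
      simp [pvPass_cons, pvStepA]
      split_ifs with h <;> simp [pvPass_cons, ih]
    by_cases h16 : x = 16
    · subst h16
      simp [pvPass_cons, pvStepA]
      split_ifs with h <;> simp [pvPass_cons, ih]
    by_cases h23 : x = 23
    · subst h23
      simp [pvPass_cons, pvStepA]
      split_ifs with h <;> simp [pvPass_cons, ih]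
    by_cases h42 : x = 42
    · subst h42
      simp [pvPass_cons, pvStepA]
      split_ifs with h <;> simp [ih]
      ring
    simp [pvPass_cons, pvStepA, h4, h8, h15, h16, h23, h42, ih]

-- ===== VERDICT (by name: the statement is the Claim_ definition above) =====
theorem filtra_array_spec : Claim_equal_filtra_array := by
  intro n array _ _
  unfold Spec_filtra_array filtra_array filtra_array_alt
  simp only [← List.foldl_map]
  rw [pvPass_inv]
  simp [List.foldl]
  ring
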